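-- pv_equiv track=rewrite | github.com/MaximePolese/AlgoPython | main.py | redescendre
-- ===== SOURCE A (Python) =====
-- def swap(list, i, j):
--     list[i], list[j] = list[j], list[i]
--
-- def redescendre(list, finArbre, index, cpt):
--     enfant1 = 2 * index + 1
--     if enfant1 < finArbre:
--         enfant2 = 2 * index + 2
--         max = 0
--         if enfant2 >= finArbre or list[enfant1] > list[enfant2]:
--             max = enfant1
--         else:
--             max = enfant2
--         cpt += 1
--         if list[max] > list[index]:
--             swap(list, index, max)
--             cpt = redescendre(list, finArbre, max, cpt + 1)
--     return cpt
-- ===== SOURCE B (Python) =====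
-- def redescendre(list, finArbre, index, cpt):
--     # Iterative sift-down; mutates `list` in place like the original.
--     while 2 * index + 1 < finArbre:
--         e1 = 2 * index + 1
--         e2 = e1 + 1
--         m = e2 if e2 < finArbre and list[e2] >= list[e1] else e1
--         if list[m] > list[index]:
--             list[index], list[m] = list[m], list[index]
--             cpt += 2
--             index = m
--         else:
--             cpt += 1
--             break
--     return cpt
-- ===== Notes on version B (the rewrite author's own statement) =====
-- stated objective: idiomatic
-- what changed: The recursive sift-down (helper swap + tail-recursive call threading cpt) is rewritten as a single while-loop that keeps index and cpt as loop variables, selects the larger child by the dual condition, swaps inline and breaks when no swap happens.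
-- outside the precondition, e.g. on redescendre([5, 1], 2, -1, 0): A returns 4, B returns 4; on redescendre([3, 1, 2], 4, 0, 0): A returns 1, B returns 1
import Mathlib
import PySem

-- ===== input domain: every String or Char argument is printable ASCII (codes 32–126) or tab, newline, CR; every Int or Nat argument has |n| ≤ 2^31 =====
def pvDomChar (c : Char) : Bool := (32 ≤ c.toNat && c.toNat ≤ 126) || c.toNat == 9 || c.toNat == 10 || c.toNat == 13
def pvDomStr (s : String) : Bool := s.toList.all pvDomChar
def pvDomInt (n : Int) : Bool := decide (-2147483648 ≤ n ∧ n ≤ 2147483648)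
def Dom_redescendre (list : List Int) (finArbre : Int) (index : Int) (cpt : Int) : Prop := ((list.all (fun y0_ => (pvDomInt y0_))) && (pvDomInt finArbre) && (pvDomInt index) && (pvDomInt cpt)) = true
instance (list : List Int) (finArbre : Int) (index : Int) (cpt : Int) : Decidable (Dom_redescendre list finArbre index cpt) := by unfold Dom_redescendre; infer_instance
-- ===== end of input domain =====

-- B replaces A's recursion (helper swap + tail call threading cpt) by an iterative
-- while-loop with index/cpt as loop variables (idiomatic; same counting).
-- A mutates `list` in place (so does B); the equivalence proved here is about the RETURN value only.

-- ===== PORT A =====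
-- def swap(list, i, j): list[i], list[j] = list[j], list[i]   (RHS read first, then assigned)
def pySwap (l : List Int) (i j : Int) : List Int :=
  PySem.List.pySetD (PySem.List.pySetD l i (PySem.List.pyGetD l j 0)) j (PySem.List.pyGetD l i 0)

-- Fuel only makes the recursion total: inside Pre_ the index strictly increases and stays
-- below finArbre, so finArbre.toNat + 1 steps always suffice (fuel is never exhausted there).
def redescendreGo : Nat → List Int → Int → Int → Int → Int
  | 0, _, _, _, cpt => cpt
  | fuel + 1, l, finArbre, index, cpt =>
    let enfant1 := 2 * index + 1
    if enfant1 < finArbre then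
      let enfant2 := 2 * index + 2
      let mx := if enfant2 ≥ finArbre ∨ PySem.List.pyGetD l enfant1 0 > PySem.List.pyGetD l enfant2 0
                then enfant1 else enfant2
      let cpt1 := cpt + 1
      if PySem.List.pyGetD l mx 0 > PySem.List.pyGetD l index 0 then
        redescendreGo fuel (pySwap l index mx) finArbre mx (cpt1 + 1)
      else cpt1
    else cpt

def redescendre (list : List Int) (finArbre : Int) (index : Int) (cpt : Int) : Int :=
  redescendreGo (finArbre.toNat + 1) list finArbre index cpt

-- ===== PORT B =====
-- the while-loop of Source B; same fuel bound makes it total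
def siftLoop : Nat → List Int → Int → Int → Int → Int
  | 0, _, _, _, cpt => cpt
  | fuel + 1, l, finArbre, index, cpt =>
    if 2 * index + 1 < finArbre then
      let e1 := 2 * index + 1
      let e2 := e1 + 1
      let m := if e2 < finArbre ∧ PySem.List.pyGetD l e2 0 ≥ PySem.List.pyGetD l e1 0 then e2 else e1
      if PySem.List.pyGetD l m 0 > PySem.List.pyGetD l index 0 then
        siftLoop fuel
          (PySem.List.pySetD (PySem.List.pySetD l index (PySem.List.pyGetD l m 0)) m (PySem.List.pyGetD l index 0))
          finArbre m (cpt + 2)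
      else cpt + 1          -- break
    else cpt

def redescendre_alt (list : List Int) (finArbre : Int) (index : Int) (cpt : Int) : Int :=
  siftLoop (finArbre.toNat + 1) list finArbre index cpt

-- ===== PRECONDITION & SPEC =====
-- Pre_ restricts to the natural sift-down domain: whenever the node has a child inside the
-- heap bound, the index must be nonnegative and the heap bound must fit the list; outside it
-- A usually raises IndexError, and where it still returns the value comes from Python
-- negative-index wraparound or reads beyond finArbre's valid range — accidental behaviour
-- no caller relies on (see cites).
def Pre_redescendre (list : List Int) (finArbre : Int) (index : Int) (cpt : Int) : Prop :=
  2 * index + 1 < finArbre → (0 ≤ index ∧ finArbre ≤ (list.length : Int))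
instance (list : List Int) (finArbre : Int) (index : Int) (cpt : Int) : Decidable (Pre_redescendre list finArbre index cpt) := by unfold Pre_redescendre; infer_instance

def pvWitness_redescendre : List Int × Int × Int × Int := ([3, 1, 2], 3, 0, 0)

def Spec_redescendre (list : List Int) (finArbre : Int) (index : Int) (cpt : Int) (out : Int) : Prop := out = redescendre_alt list finArbre index cpt
instance (list : List Int) (finArbre : Int) (index : Int) (cpt : Int) (out : Int) : Decidable (Spec_redescendre list finArbre index cpt out) := by unfold Spec_redescendre; infer_instance

-- ===== CLAIM (what is proved, stated in full; the proofs are below) =====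
def Claim_equal_redescendre : Prop := ∀ (list : List Int) (finArbre : Int) (index : Int) (cpt : Int), Dom_redescendre list finArbre index cpt → Pre_redescendre list finArbre index cpt → Spec_redescendre list finArbre index cpt (redescendre list finArbre index cpt)

-- ===== LEMMAS AND PROOFS =====

-- The two loop bodies perform the same state transition, so with equal fuel they agree
-- on every state (the equivalence does not even need Pre_).
theorem go_eq_loop (fuel : Nat) : ∀ (l : List Int) (finArbre index cpt : Int),
    redescendreGo fuel l finArbre index cpt = siftLoop fuel l finArbre index cpt := by
  induction fuel with
  | zero => intro l finArbre index cpt; rfl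
  | succ n ih =>
    intro l finArbre index cpt
    simp only [redescendreGo, siftLoop]
    have h22 : 2 * index + 1 + 1 = 2 * index + 2 := by ring
    rw [h22]
    by_cases h1 : 2 * index + 1 < finArbre
    · rw [if_pos h1, if_pos h1]
      by_cases hc : 2 * index + 2 ≥ finArbre ∨
          PySem.List.pyGetD l (2 * index + 1) 0 > PySem.List.pyGetD l (2 * index + 2) 0
      · -- A picks enfant1; B's dual condition is false, so B picks e1 too
        rw [if_pos hc, if_neg (show ¬(2 * index + 2 < finArbre ∧
            PySem.List.pyGetD l (2 * index + 2) 0 ≥ PySem.List.pyGetD l (2 * index + 1) 0) by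
          rcases hc with h | h
          · exact fun hx => absurd hx.1 (by omega)
          · exact fun hx => absurd hx.2 (by omega))]
        by_cases h2 : PySem.List.pyGetD l (2 * index + 1) 0 > PySem.List.pyGetD l index 0
        · rw [if_pos h2, if_pos h2]
          simp only [pySwap]
          rw [ih]
          have hcpt : cpt + 1 + 1 = cpt + 2 := by ring
          rw [hcpt]
        · rw [if_neg h2, if_neg h2]
      · -- A picks enfant2; B's dual condition holds
        rw [if_neg hc, if_pos (show 2 * index + 2 < finArbre ∧
            PySem.List.pyGetD l (2 * index + 2) 0 ≥ PySem.List.pyGetD l (2 * index + 1) 0 by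
          push_neg at hc; exact ⟨hc.1, hc.2⟩)]
        by_cases h2 : PySem.List.pyGetD l (2 * index + 2) 0 > PySem.List.pyGetD l index 0
        · rw [if_pos h2, if_pos h2]
          simp only [pySwap]
          rw [ih]
          have hcpt : cpt + 1 + 1 = cpt + 2 := by ring
          rw [hcpt]
        · rw [if_neg h2, if_neg h2]
    · rw [if_neg h1, if_neg h1]

-- ===== VERDICT (by name: the statement is the Claim_ definition above) =====
theorem redescendre_spec : Claim_equal_redescendre := by
  intro list finArbre index cpt _ _
  unfold Spec_redescendre redescendre redescendre_alt
  exact go_eq_loop _ list finArbre index cpt
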